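-- pv_equiv track=rewrite | github.com/jarik-marwede/ideabag2-projects | Text/Scooby Doo.py | scoobydoo
-- ===== SOURCE A (Python) =====
-- def scoobydoo(string: str) -> str:
--     """Return a scooby dooed version of string
--     """
--     new_string = ""
--     vowels = ("a", "e", "i", "o", "u")
--     consonants = ("b", "c", "d", "f", "g",
--                   "h", "j", "k", "l", "m",
--                   "n", "p", "q", "r", "s",
--                   "t", "v", "w", "x", "z")
--     for word in string.split():
--         skip = False
--         for index, char in enumerate(word):
--             if skip is True:
--                 new_string += char
--             elif char.lower() in vowels:
--                 new_string += char
--                 skip = True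
--             elif char.lower() in consonants:
--                 new_string += "r"
--             else:
--                 new_string += char
--         new_string += " "
--     new_string = new_string.rstrip()
--     return new_string
-- ===== SOURCE B (Python) =====
-- def scoobydoo(string: str) -> str:
--     """Return a scooby dooed version of string"""
--     vowels = {"a", "e", "i", "o", "u"}
--     consonants = {"b", "c", "d", "f", "g", "h", "j", "k", "l", "m",
--                   "n", "p", "q", "r", "s", "t", "v", "w", "x", "z"}
--     words = []
--     for word in string.split():
--         idx = next((i for i, c in enumerate(word) if c.lower() in vowels),
--                    len(word))
--         words.append("".join("r" if c.lower() in consonants else c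
--                              for c in word[:idx]) + word[idx:])
--     return " ".join(words)
-- ===== Notes on version B (the rewrite author's own statement) =====
-- stated objective: simpler
-- what changed: Replaces A's stateful skip-flag character loop accumulating one big string (then rstrip) with a per-word decomposition: find the first vowel index, map each consonant in the prefix to the letter r, keep the suffix, and space-join the transformed words.
import Mathlib
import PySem

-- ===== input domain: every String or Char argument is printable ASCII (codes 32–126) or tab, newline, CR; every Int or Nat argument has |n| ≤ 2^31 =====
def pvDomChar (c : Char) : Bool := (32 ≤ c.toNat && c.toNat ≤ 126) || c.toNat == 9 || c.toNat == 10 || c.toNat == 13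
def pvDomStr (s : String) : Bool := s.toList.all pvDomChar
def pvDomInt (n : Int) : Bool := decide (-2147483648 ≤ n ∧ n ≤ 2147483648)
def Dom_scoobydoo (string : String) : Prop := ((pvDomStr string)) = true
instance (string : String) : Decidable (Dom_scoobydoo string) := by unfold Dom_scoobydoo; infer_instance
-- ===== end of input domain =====

-- B replaces A's skip-flag character loop by a per-word decomposition (find first
-- vowel, rewrite the consonants of the prefix, keep the tail) joined by spaces; objective: simpler.

-- ===== PORT A =====
def pvVowels : List Char := ['a','e','i','o','u']
def pvConsonants : List Char :=
  ['b','c','d','f','g','h','j','k','l','m','n','p','q','r','s','t','v','w','x','z']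

-- A's inner loop step over (new_string, skip)
def pvStepA (p : List Char × Bool) (ic : Int × Char) : List Char × Bool :=
  let ns := p.1; let skip := p.2; let char := ic.2
  if skip = true then (ns ++ [char], skip)
  else if PySem.Chars.lowerChar char ∈ pvVowels then (ns ++ [char], true)
  else if PySem.Chars.lowerChar char ∈ pvConsonants then (ns ++ ['r'], skip)
  else (ns ++ [char], skip)

def scoobydoo (string : String) : String :=
  let new := (PySem.Chars.split₀ string.toList).foldl
    (fun acc word =>
      ((PySem.List.enumerate word 0).foldl pvStepA (acc, false)).1 ++ [' '])
    []
  String.ofList (PySem.Chars.rstrip new)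

-- ===== PORT B =====
-- idx = first vowel position (word.length if none); map prefix, keep suffix
def pvWordB (word : List Char) : List Char :=
  let idx := word.findIdx (fun c => PySem.Chars.lowerChar c ∈ pvVowels)
  (word.take idx).map
    (fun c => if PySem.Chars.lowerChar c ∈ pvConsonants then 'r' else c)
  ++ word.drop idx

def scoobydoo_alt (string : String) : String :=
  String.ofList (PySem.Chars.join [' '] ((PySem.Chars.split₀ string.toList).map pvWordB))

-- ===== PRECONDITION & SPEC =====
def Spec_scoobydoo (string : String) (out : String) : Prop := out = scoobydoo_alt string
instance (string : String) (out : String) : Decidable (Spec_scoobydoo string out) := by unfold Spec_scoobydoo; infer_instance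

-- ===== CLAIM (what is proved, stated in full; the proofs are below) =====
def Claim_equal_scoobydoo : Prop := ∀ (string : String), Dom_scoobydoo string → Spec_scoobydoo string (scoobydoo string)

-- ===== LEMMAS AND PROOFS =====

-- A's inner loop, once skip is set, copies the rest of the word
lemma innerA_true (word : List Char) (acc : List Char) (s : Int) :
    (PySem.List.enumerate word s).foldl pvStepA (acc, true) = (acc ++ word, true) := by
  induction word generalizing acc s with
  | nil => simp [PySem.List.enumerate_nil]
  | cons c cs ih => simp [PySem.List.enumerate_cons, pvStepA, ih]

-- A's inner loop with skip not yet set computes B's per-word transform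
lemma innerA_false (word : List Char) (acc : List Char) (s : Int) :
    ((PySem.List.enumerate word s).foldl pvStepA (acc, false)).1 = acc ++ pvWordB word := by
  induction word generalizing acc s with
  | nil => simp [PySem.List.enumerate_nil, pvWordB]
  | cons c cs ih =>
    by_cases hv : PySem.Chars.lowerChar c ∈ pvVowels
    · simp [PySem.List.enumerate_cons, pvStepA, hv, innerA_true, pvWordB, List.findIdx_cons]
    · by_cases hc : PySem.Chars.lowerChar c ∈ pvConsonants
      · simp [PySem.List.enumerate_cons, pvStepA, hv, hc, ih, pvWordB, List.findIdx_cons]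
      · simp [PySem.List.enumerate_cons, pvStepA, hv, hc, ih, pvWordB, List.findIdx_cons]

-- every char of B's transform is 'r' or a char of the word
lemma mem_pvWordB {c : Char} {word : List Char} (h : c ∈ pvWordB word) :
    c = 'r' ∨ c ∈ word := by
  unfold pvWordB at h
  rcases List.mem_append.1 h with h | h
  · rcases List.mem_map.1 h with ⟨d, hd, hdc⟩
    by_cases hdc' : PySem.Chars.lowerChar d ∈ pvConsonants
    · left; simp [hdc'] at hdc; exact hdc.symm
    · right; simp [hdc'] at hdc; subst hdc; exact List.mem_of_mem_take hd
  · exact Or.inr (List.mem_of_mem_drop h)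

lemma pvWordB_ne_nil {word : List Char} (h : word ≠ []) : pvWordB word ≠ [] := by
  unfold pvWordB
  intro hcon
  rcases List.append_eq_nil_iff.1 hcon with ⟨h1, h2⟩
  cases word with
  | nil => exact h rfl
  | cons c cs =>
    rcases List.map_eq_nil_iff.1 h1 with h1'
    rw [List.take_eq_nil_iff] at h1'
    rcases h1' with h1' | h1'
    · rw [h1'] at h2; simp at h2
    · simp at h1'

-- the invariant satisfied by the words that split() produces
def pvGoodWord (w : List Char) : Prop := w ≠ [] ∧ ∀ c ∈ w, PySem.Chars.isspace c = false

lemma split₀_good : ∀ (s cur : List Char) (acc : List (List Char)),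
    (∀ c ∈ cur, PySem.Chars.isspace c = false) →
    (∀ w ∈ acc, pvGoodWord w) →
    ∀ w ∈ PySem.Chars.split₀.go s cur acc, pvGoodWord w := by
  intro s
  induction s with
  | nil =>
    intro cur acc hcur hacc w hw
    rw [PySem.Chars.split₀.go] at hw
    by_cases hc : cur.isEmpty
    · simp [hc] at hw
      exact hacc w hw
    · simp [hc] at hw
      rcases hw with hw | hw
      all_goals first
        | exact hacc w hw
        | (subst hw
           exact ⟨by simp [List.isEmpty_iff] at hc; simpa using hc,
             fun d hd => hcur d (List.mem_reverse.1 hd)⟩)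
  | cons c rest ih =>
    intro cur acc hcur hacc w hw
    rw [PySem.Chars.split₀.go] at hw
    by_cases hs : PySem.Chars.isspace c
    · by_cases hc : cur.isEmpty
      · simp [hs, hc] at hw
        exact ih [] acc (by simp) hacc w hw
      · simp [hs, hc] at hw
        refine ih [] (cur.reverse :: acc) (by simp) ?_ w hw
        intro v hv
        rcases List.mem_cons.1 hv with hv | hv
        · subst hv
          refine ⟨?_, ?_⟩
          · simp [List.isEmpty_iff] at hc; simpa using hc
          · intro d hd; exact hcur d (List.mem_reverse.1 hd)
        · exact hacc v hv
    · simp [hs] at hw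
      refine ih (c :: cur) acc ?_ hacc w hw
      intro d hd
      rcases List.mem_cons.1 hd with hd | hd
      · subst hd; simpa using hs
      · exact hcur d hd

lemma split₀_words_good (s : List Char) :
    ∀ w ∈ PySem.Chars.split₀ s, pvGoodWord w := by
  intro w hw
  exact split₀_good s [] [] (by simp) (by simp) w hw

-- rstrip drops a trailing space
lemma rstrip_append_space (xs : List Char) :
    PySem.Chars.rstrip (xs ++ [' ']) = PySem.Chars.rstrip xs := by
  simp only [PySem.Chars.rstrip, List.reverse_append, List.reverse_singleton,
    List.singleton_append]
  rw [List.dropWhile_cons_of_pos (by decide)]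

-- rstrip is the identity on a list whose last char is not whitespace
lemma rstrip_of_last_not_space (xs : List Char)
    (h : ∀ c, xs.getLast? = some c → PySem.Chars.isspace c = false) :
    PySem.Chars.rstrip xs = xs := by
  cases hlast : xs.getLast? with
  | none => rw [List.getLast?_eq_none_iff.1 hlast]; simp [PySem.Chars.rstrip]
  | some c =>
    have hx := List.getLast?_eq_some_iff.1 hlast
    rcases hx with ⟨ys, rfl⟩
    simp [PySem.Chars.rstrip, h c hlast]

-- A's outer loop appends word-transform + ' ' for each word
lemma outerA (ws : List (List Char)) (acc : List Char) :
    ws.foldl (fun acc word =>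
      ((PySem.List.enumerate word 0).foldl pvStepA (acc, false)).1 ++ [' ']) acc
    = acc ++ (ws.map (fun w => pvWordB w ++ [' '])).flatten := by
  simp only [innerA_false]
  simp [pysem]

-- flattening words-with-trailing-space is join + one trailing space
lemma flatten_eq_join_space (ws : List (List Char)) (hne : ws ≠ []) :
    (ws.map (fun w => w ++ [' '])).flatten
      = PySem.Chars.join [' '] ws ++ [' '] := by
  induction ws with
  | nil => exact absurd rfl hne
  | cons w ws ih =>
    cases ws with
    | nil => simp [PySem.Chars.join, List.intercalate]
    | cons v vs =>
      have ih' := ih (by simp)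
      simp only [List.map_cons, List.flatten_cons] at ih' ⊢
      rw [ih']
      simp [PySem.Chars.join, List.intercalate]

lemma getLast?_join_space (ws : List (List Char)) (hne : ws ≠ [])
    (hgood : ∀ w ∈ ws, w ≠ []) :
    ∃ w ∈ ws, ∃ c, (PySem.Chars.join [' '] ws).getLast? = some c ∧ c ∈ w := by
  induction ws with
  | nil => exact absurd rfl hne
  | cons w ws ih =>
    cases ws with
    | nil =>
      have hw : w ≠ [] := hgood w (by simp)
      cases hlast : w.getLast? with
      | none => exact absurd (List.getLast?_eq_none_iff.1 hlast) hw
      | some c =>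
        exact ⟨w, by simp, c, by simpa [PySem.Chars.join, List.intercalate] using hlast,
          List.mem_of_getLast? hlast⟩
    | cons v vs =>
      rcases ih (by simp) (fun u hu => hgood u (List.mem_cons_of_mem _ hu)) with
        ⟨u, hu, c, hc, hcu⟩
      refine ⟨u, List.mem_cons_of_mem _ hu, c, ?_, hcu⟩
      rw [show PySem.Chars.join [' '] (w :: v :: vs)
            = w ++ [' '] ++ PySem.Chars.join [' '] (v :: vs) by
          simp [PySem.Chars.join, List.intercalate]]
      rw [List.getLast?_append_of_ne_nil]
      · exact hc
      · intro h
        have := (PySem.Chars.join [' '] (v :: vs)).getLast?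
        rw [h] at hc; simp at hc

-- ===== VERDICT (by name: the statement is the Claim_ definition above) =====
theorem scoobydoo_spec : Claim_equal_scoobydoo := by
  intro string _
  unfold Spec_scoobydoo scoobydoo scoobydoo_alt
  simp only []
  rw [outerA]
  congr 1
  set ws := PySem.Chars.split₀ string.toList with hws
  cases hne : ws with
  | nil => simp [PySem.Chars.rstrip, PySem.Chars.join, List.intercalate]
  | cons w rest =>
    rw [← hne]
    have hne' : ws ≠ [] := by rw [hne]; simp
    have hgood := split₀_words_good string.toList
    rw [← hws] at hgood
    rw [show (ws.map (fun w => pvWordB w ++ [' '])).flatten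
          = (List.map (fun w => w ++ [' ']) (ws.map pvWordB)).flatten by
        simp [Function.comp_def]]
    rw [flatten_eq_join_space _ (by simp [hne'])]
    simp only [List.nil_append]
    rw [rstrip_append_space]
    apply rstrip_of_last_not_space
    intro c hc
    rcases getLast?_join_space (ws.map pvWordB) (by simp [hne'])
        (fun u hu => by
          rcases List.mem_map.1 hu with ⟨v, hv, rfl⟩
          exact pvWordB_ne_nil (hgood v hv).1) with ⟨u, hu, c', hc', hcu⟩
    rw [hc] at hc'
    cases hc'
    rcases List.mem_map.1 hu with ⟨v, hv, rfl⟩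
    rcases mem_pvWordB hcu with rfl | hcv
    · decide
    · exact (hgood v hv).2 c hcv
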